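-- pv_equiv track=rewrite | github.com/yhoutzager/AOC2021 | src/day19.py | compare_scanner
-- ===== SOURCE A (Python) =====
-- def rotate_vectors_yield(vectors):
-- 	roll = lambda x, y, z: (x, z, -y)
-- 	turn = lambda x, y, z: (-y, x, z)
--
-- 	for c in range(2):
-- 		for s in range(3):
-- 			vectors = [roll(*vector) for vector in vectors]
-- 			yield vectors
-- 			for i in range(3):
-- 				vectors = [turn(*vector) for vector in vectors]
-- 				yield vectors
-- 		vectors = [roll(*turn(*roll(*vector))) for vector in vectors]
--
-- def diff(a, b):
-- 	return a[0] - b[0], a[1] - b[1], a[2] - b[2]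
--
-- def offset_points(offset, beacons):
-- 	new_beacons = []
-- 	for beacon in beacons:
-- 		new_beacons.append((beacon[0] + offset[0], beacon[1] + offset[1], beacon[2] + offset[2]))
-- 	return new_beacons
--
-- def compare_scanner(a, b):
-- 	for b_rot in rotate_vectors_yield(b):
-- 		counter = 0
-- 		for ai1 in range(len(a)):
-- 			if (len(a) - ai1 + counter) < 12:
-- 				break
-- 			a1_count = 0
-- 			for ai2 in range(ai1 + 1, len(a)):
-- 				if (len(a) - ai1 + a1_count) < 12:
-- 					break
-- 				found = False
-- 				for bi1 in range(len(b_rot)):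
-- 					for bi2 in range(bi1 + 1, len(b_rot)):
-- 						if diff(a[ai1], a[ai2]) == diff(b_rot[bi1], b_rot[bi2]):
-- 							counter += 1
-- 							a1_count += 1
-- 							if counter == 12:
-- 								offset = (a[ai1][0] - b_rot[bi1][0], a[ai1][1] - b_rot[bi1][1], a[ai1][2] - b_rot[bi1][2])
-- 								return offset_points(offset, b_rot), offset
-- 							found = True
-- 							break
-- 					if found:
-- 						break
--
--
-- 	return None, None
-- ===== SOURCE B (Python) =====
-- # B: same matching logic, but the 24 rotations are applied as precomputed basis images
-- # and each rotation's pairwise diffs of b are indexed once in a hash map, so every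
-- # a-pair match test is an O(1) lookup instead of a scan over all b-pairs.
--
-- # image of the basis vectors under each of the 24 rotations, in the order the
-- # original generator yields them
-- _ROTS = [
--     ((1, 0, 0), (0, 0, -1), (0, 1, 0)),
--     ((0, 1, 0), (0, 0, -1), (-1, 0, 0)),
--     ((-1, 0, 0), (0, 0, -1), (0, -1, 0)),
--     ((0, -1, 0), (0, 0, -1), (1, 0, 0)),
--     ((0, 0, 1), (0, -1, 0), (1, 0, 0)),
--     ((0, 0, 1), (1, 0, 0), (0, 1, 0)),
--     ((0, 0, 1), (0, 1, 0), (-1, 0, 0)),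
--     ((0, 0, 1), (-1, 0, 0), (0, -1, 0)),
--     ((0, 1, 0), (-1, 0, 0), (0, 0, 1)),
--     ((-1, 0, 0), (0, -1, 0), (0, 0, 1)),
--     ((0, -1, 0), (1, 0, 0), (0, 0, 1)),
--     ((1, 0, 0), (0, 1, 0), (0, 0, 1)),
--     ((0, -1, 0), (0, 0, 1), (-1, 0, 0)),
--     ((1, 0, 0), (0, 0, 1), (0, -1, 0)),
--     ((0, 1, 0), (0, 0, 1), (1, 0, 0)),
--     ((-1, 0, 0), (0, 0, 1), (0, 1, 0)),
--     ((-1, 0, 0), (0, 1, 0), (0, 0, -1)),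
--     ((0, -1, 0), (-1, 0, 0), (0, 0, -1)),
--     ((1, 0, 0), (0, -1, 0), (0, 0, -1)),
--     ((0, 1, 0), (1, 0, 0), (0, 0, -1)),
--     ((0, 0, -1), (1, 0, 0), (0, -1, 0)),
--     ((0, 0, -1), (0, 1, 0), (1, 0, 0)),
--     ((0, 0, -1), (-1, 0, 0), (0, 1, 0)),
--     ((0, 0, -1), (0, -1, 0), (-1, 0, 0)),
-- ]
--
--
-- def compare_scanner(a, b):
--     n = len(a)
--     for r0, r1, r2 in _ROTS:
--         b_rot = [(x * r0[0] + y * r1[0] + z * r2[0],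
--                   x * r0[1] + y * r1[1] + z * r2[1],
--                   x * r0[2] + y * r1[2] + z * r2[2]) for (x, y, z) in b]
--         # index: pairwise diff -> the first pair's first point (first occurrence wins)
--         first = {}
--         for i1 in range(len(b_rot)):
--             p1 = b_rot[i1]
--             for i2 in range(i1 + 1, len(b_rot)):
--                 p2 = b_rot[i2]
--                 d = (p1[0] - p2[0], p1[1] - p2[1], p1[2] - p2[2])
--                 if d not in first:
--                     first[d] = p1
--         counter = 0
--         for ai1 in range(n):
--             if n - ai1 + counter < 12:
--                 break
--             a1 = a[ai1]
--             a1_count = 0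
--             for ai2 in range(ai1 + 1, n):
--                 if n - ai1 + a1_count < 12:
--                     break
--                 a2 = a[ai2]
--                 p1 = first.get((a1[0] - a2[0], a1[1] - a2[1], a1[2] - a2[2]))
--                 if p1 is not None:
--                     counter += 1
--                     a1_count += 1
--                     if counter == 12:
--                         offset = (a1[0] - p1[0], a1[1] - p1[1], a1[2] - p1[2])
--                         return [(q[0] + offset[0], q[1] + offset[1], q[2] + offset[2])
--                                 for q in b_rot], offset
--     return None, None
-- ===== Notes on version B (the rewrite author's own statement) =====
-- stated objective: faster
-- what changed: B precomputes the 24 rotations as basis-image matrices and, per rotation, builds a hash map from pairwise b-diffs to the first pair's point, so each a-pair match test is an O(1) dict lookup instead of a scan over all b-pairs.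
import Mathlib
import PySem

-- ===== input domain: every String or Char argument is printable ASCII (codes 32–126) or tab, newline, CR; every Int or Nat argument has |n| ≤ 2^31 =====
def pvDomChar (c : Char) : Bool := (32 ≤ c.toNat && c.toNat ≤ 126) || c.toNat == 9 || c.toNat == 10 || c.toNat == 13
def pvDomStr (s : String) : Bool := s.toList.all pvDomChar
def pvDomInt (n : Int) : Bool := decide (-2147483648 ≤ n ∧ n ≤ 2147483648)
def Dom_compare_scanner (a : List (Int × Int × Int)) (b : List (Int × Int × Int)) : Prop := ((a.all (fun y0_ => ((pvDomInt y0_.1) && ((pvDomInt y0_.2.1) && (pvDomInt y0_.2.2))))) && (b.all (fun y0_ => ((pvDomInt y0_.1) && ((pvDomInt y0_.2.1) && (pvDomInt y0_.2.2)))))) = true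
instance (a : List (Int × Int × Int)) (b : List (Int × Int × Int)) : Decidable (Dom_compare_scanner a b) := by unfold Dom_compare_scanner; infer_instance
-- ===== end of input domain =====

-- B replaces A's inner scan over all b-pairs by a hash index of b-pair diffs built once
-- per rotation, and applies the 24 rotations as precomputed basis images (objective: faster).

abbrev PvV : Type := Int × Int × Int
abbrev PvR : Type := (Option (List PvV)) × (Option PvV)

-- ===== PORT A =====
def pvRoll (p : PvV) : PvV := (p.1, p.2.2, -p.2.1)
def pvTurn (p : PvV) : PvV := (-p.2.1, p.1, p.2.2)
def pvDiffA (p q : PvV) : PvV := (p.1 - q.1, p.2.1 - q.2.1, p.2.2 - q.2.2)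

-- rotate_vectors_yield: the generator, as the list of its 24 yields
def pvTurnLoop (st : List PvV × List (List PvV)) (_ : Nat) : List PvV × List (List PvV) :=
  let v := st.1.map pvTurn
  (v, st.2 ++ [v])

def pvSLoop (st : List PvV × List (List PvV)) (_ : Nat) : List PvV × List (List PvV) :=
  let v := st.1.map pvRoll
  (List.range 3).foldl pvTurnLoop (v, st.2 ++ [v])

def pvCLoop (st : List PvV × List (List PvV)) (_ : Nat) : List PvV × List (List PvV) :=
  let st' := (List.range 3).foldl pvSLoop st
  (st'.1.map (fun p => pvRoll (pvTurn (pvRoll p))), st'.2)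

def pvRotateVectorsYield (v0 : List PvV) : List (List PvV) :=
  ((List.range 2).foldl pvCLoop (v0, [])).2

-- offset_points: append loop
def pvOffsetPoints (off : PvV) (bs : List PvV) : List PvV :=
  bs.foldl (fun acc p => acc ++ [(p.1 + off.1, p.2.1 + off.2.1, p.2.2 + off.2.2)]) []

-- inner bi2 loop (break = return)
def pvFindInner (d : PvV) (b1 : PvV) : List PvV → Option PvV
  | [] => none
  | b2 :: rest => if pvDiffA b1 b2 = d then some b2 else pvFindInner d b1 rest

-- bi1 loop with the 'found' flag (break = return)
def pvFindPair (d : PvV) : List PvV → Option (PvV × PvV)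
  | [] => none
  | b1 :: rest =>
    match pvFindInner d b1 rest with
    | some b2 => some (b1, b2)
    | none => pvFindPair d rest

-- ai2 loop: inl = the function returned, inr = loop finished with this counter
def pvLoopA2 (brot : List PvV) (la1 : Nat) (a1 : PvV) : List PvV → Int → Int → PvR ⊕ Int
  | [], counter, _ => Sum.inr counter
  | a2 :: rest, counter, a1c =>
    if (la1 : Int) + a1c < 12 then Sum.inr counter
    else
      match pvFindPair (pvDiffA a1 a2) brot with
      | some (b1, _) =>
        let counter' := counter + 1
        let a1c' := a1c + 1
        if counter' = 12 then
          let off : PvV := (a1.1 - b1.1, a1.2.1 - b1.2.1, a1.2.2 - b1.2.2)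
          Sum.inl (some (pvOffsetPoints off brot), some off)
        else pvLoopA2 brot la1 a1 rest counter' a1c'
      | none => pvLoopA2 brot la1 a1 rest counter a1c

-- ai1 loop; (a1 :: rest).length is Python's len(a) - ai1
def pvLoopA1 (brot : List PvV) : List PvV → Int → Option PvR
  | [], _ => none
  | a1 :: rest, counter =>
    if (((a1 :: rest).length : Int) + counter) < 12 then none
    else
      match pvLoopA2 brot (a1 :: rest).length a1 rest counter 0 with
      | Sum.inl r => some r
      | Sum.inr counter' => pvLoopA1 brot rest counter'

def pvTryRots (a : List PvV) : List (List PvV) → PvR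
  | [] => (none, none)
  | brot :: rs =>
    match pvLoopA1 brot a 0 with
    | some r => r
    | none => pvTryRots a rs

def compare_scanner (a : List (Int × Int × Int)) (b : List (Int × Int × Int)) : (Option (List (Int × Int × Int))) × (Option (Int × Int × Int)) :=
  pvTryRots a (pvRotateVectorsYield b)

-- ===== PORT B =====
abbrev PvM : Type := PvV × PvV × PvV

def pvbRots : List PvM := [
  ((1, 0, 0), (0, 0, -1), (0, 1, 0)),
  ((0, 1, 0), (0, 0, -1), (-1, 0, 0)),
  ((-1, 0, 0), (0, 0, -1), (0, -1, 0)),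
  ((0, -1, 0), (0, 0, -1), (1, 0, 0)),
  ((0, 0, 1), (0, -1, 0), (1, 0, 0)),
  ((0, 0, 1), (1, 0, 0), (0, 1, 0)),
  ((0, 0, 1), (0, 1, 0), (-1, 0, 0)),
  ((0, 0, 1), (-1, 0, 0), (0, -1, 0)),
  ((0, 1, 0), (-1, 0, 0), (0, 0, 1)),
  ((-1, 0, 0), (0, -1, 0), (0, 0, 1)),
  ((0, -1, 0), (1, 0, 0), (0, 0, 1)),
  ((1, 0, 0), (0, 1, 0), (0, 0, 1)),
  ((0, -1, 0), (0, 0, 1), (-1, 0, 0)),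
  ((1, 0, 0), (0, 0, 1), (0, -1, 0)),
  ((0, 1, 0), (0, 0, 1), (1, 0, 0)),
  ((-1, 0, 0), (0, 0, 1), (0, 1, 0)),
  ((-1, 0, 0), (0, 1, 0), (0, 0, -1)),
  ((0, -1, 0), (-1, 0, 0), (0, 0, -1)),
  ((1, 0, 0), (0, -1, 0), (0, 0, -1)),
  ((0, 1, 0), (1, 0, 0), (0, 0, -1)),
  ((0, 0, -1), (1, 0, 0), (0, -1, 0)),
  ((0, 0, -1), (0, 1, 0), (1, 0, 0)),
  ((0, 0, -1), (-1, 0, 0), (0, 1, 0)),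
  ((0, 0, -1), (0, -1, 0), (-1, 0, 0))]

def pvbApply (r : PvM) (p : PvV) : PvV :=
  (p.1 * r.1.1 + p.2.1 * r.2.1.1 + p.2.2 * r.2.2.1,
   p.1 * r.1.2.1 + p.2.1 * r.2.1.2.1 + p.2.2 * r.2.2.2.1,
   p.1 * r.1.2.2 + p.2.1 * r.2.1.2.2 + p.2.2 * r.2.2.2.2)

-- inner i2 loop of the index build (insert only if the key is absent)
def pvbBuildInner (b1 : PvV) : List PvV → PySem.Dict PvV PvV → PySem.Dict PvV PvV
  | [], d => d
  | b2 :: rest, d =>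
    let k : PvV := (b1.1 - b2.1, b1.2.1 - b2.2.1, b1.2.2 - b2.2.2)
    pvbBuildInner b1 rest (if d.contains k then d else d.insert k b1)

-- i1 loop of the index build
def pvbBuild : List PvV → PySem.Dict PvV PvV → PySem.Dict PvV PvV
  | [], d => d
  | b1 :: rest, d => pvbBuild rest (pvbBuildInner b1 rest d)

def pvbLoopA2 (first : PySem.Dict PvV PvV) (brot : List PvV) (la1 : Nat) (a1 : PvV) :
    List PvV → Int → Int → PvR ⊕ Int
  | [], counter, _ => Sum.inr counter
  | a2 :: rest, counter, a1c =>
    if (la1 : Int) + a1c < 12 then Sum.inr counter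
    else
      match first.get? (a1.1 - a2.1, a1.2.1 - a2.2.1, a1.2.2 - a2.2.2) with
      | some p1 =>
        let counter' := counter + 1
        let a1c' := a1c + 1
        if counter' = 12 then
          let off : PvV := (a1.1 - p1.1, a1.2.1 - p1.2.1, a1.2.2 - p1.2.2)
          Sum.inl (some (brot.map (fun q => (q.1 + off.1, q.2.1 + off.2.1, q.2.2 + off.2.2))), some off)
        else pvbLoopA2 first brot la1 a1 rest counter' a1c'
      | none => pvbLoopA2 first brot la1 a1 rest counter a1c

def pvbLoopA1 (first : PySem.Dict PvV PvV) (brot : List PvV) : List PvV → Int → Option PvR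
  | [], _ => none
  | a1 :: rest, counter =>
    if (((a1 :: rest).length : Int) + counter) < 12 then none
    else
      match pvbLoopA2 first brot (a1 :: rest).length a1 rest counter 0 with
      | Sum.inl r => some r
      | Sum.inr counter' => pvbLoopA1 first brot rest counter'

def pvbTryRots (a : List PvV) (b : List PvV) : List PvM → PvR
  | [] => (none, none)
  | r :: rs =>
    let brot := b.map (pvbApply r)
    let first := pvbBuild brot PySem.Dict.empty
    match pvbLoopA1 first brot a 0 with
    | some res => res
    | none => pvbTryRots a b rs

def compare_scanner_alt (a : List (Int × Int × Int)) (b : List (Int × Int × Int)) : (Option (List (Int × Int × Int))) × (Option (Int × Int × Int)) :=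
  pvbTryRots a b pvbRots

-- ===== PRECONDITION & SPEC =====
def Spec_compare_scanner (a : List (Int × Int × Int)) (b : List (Int × Int × Int)) (out : (Option (List (Int × Int × Int))) × (Option (Int × Int × Int))) : Prop := out = compare_scanner_alt a b
instance (a : List (Int × Int × Int)) (b : List (Int × Int × Int)) (out : (Option (List (Int × Int × Int))) × (Option (Int × Int × Int))) : Decidable (Spec_compare_scanner a b out) := by unfold Spec_compare_scanner; infer_instance

-- ===== CLAIM (what is proved, stated in full; the proofs are below) =====
def Claim_equal_compare_scanner : Prop := ∀ (a : List (Int × Int × Int)) (b : List (Int × Int × Int)), Dom_compare_scanner a b → Spec_compare_scanner a b (compare_scanner a b)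

-- ===== LEMMAS AND PROOFS =====

-- the generator's 24 yields are exactly the 24 basis-image matrices applied pointwise
lemma pv_map_ext {f g : PvV → PvV} (h : ∀ p, f p = g p) (l : List PvV) :
    l.map f = l.map g := List.map_congr_left (fun p _ => h p)

lemma pv_rots_eq (b : List PvV) :
    pvRotateVectorsYield b = pvbRots.map (fun r => b.map (pvbApply r)) := by
  simp only [pvRotateVectorsYield, pvCLoop, pvSLoop, pvTurnLoop, pvbRots,
    List.range_succ, List.range_zero, List.foldl_nil, List.foldl_cons, List.nil_append, List.cons_append, List.map_map, List.map_cons, List.map_nil]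
  simp only [List.cons.injEq, and_true]
  refine ⟨?_, ?_, ?_, ?_, ?_, ?_, ?_, ?_, ?_, ?_, ?_, ?_, ?_, ?_, ?_, ?_, ?_, ?_, ?_, ?_, ?_, ?_, ?_, ?_⟩ <;>
    (apply pv_map_ext; rintro ⟨x, y, z⟩;
     simp only [Function.comp, pvRoll, pvTurn, pvbApply];
     refine Prod.ext ?_ (Prod.ext ?_ ?_) <;> simp)

-- the hash index looks up exactly what A's first-match scan finds
lemma pv_buildInner_get? (b1 : PvV) (l : List PvV) (d : PySem.Dict PvV PvV) (k : PvV) :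
    (pvbBuildInner b1 l d).get? k = (d.get? k).or ((pvFindInner k b1 l).map (fun _ => b1)) := by
  induction l generalizing d with
  | nil => simp [pvbBuildInner, pvFindInner]
  | cons b2 rest ih =>
    have hkey : (b1.1 - b2.1, b1.2.1 - b2.2.1, b1.2.2 - b2.2.2) = pvDiffA b1 b2 := rfl
    simp only [pvbBuildInner, pvFindInner, hkey, ih]
    by_cases hk : pvDiffA b1 b2 = k
    · subst hk
      by_cases hc : d.contains (pvDiffA b1 b2)
      · have hs : (d.get? (pvDiffA b1 b2)).isSome = true := by
          rw [← PySem.Dict.contains_eq_isSome_get?]; exact hc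
        rcases Option.isSome_iff_exists.mp hs with ⟨v, hv⟩
        simp [hc, hv]
      · have hnone : d.get? (pvDiffA b1 b2) = none := by
          rw [PySem.Dict.get?_eq_none_iff_contains]; simpa using hc
        simp [hc, hnone, PySem.Dict.get?_insert_self]
    · have hne : k ≠ pvDiffA b1 b2 := Ne.symm hk
      by_cases hc : d.contains (pvDiffA b1 b2)
      · simp [hc, hk]
      · simp [hc, hk, PySem.Dict.get?_insert_of_ne d b1 hne]

lemma pv_build_get? (l : List PvV) (d : PySem.Dict PvV PvV) (k : PvV) :
    (pvbBuild l d).get? k = (d.get? k).or ((pvFindPair k l).map Prod.fst) := by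
  induction l generalizing d with
  | nil => simp [pvbBuild, pvFindPair]
  | cons b1 rest ih =>
    simp only [pvbBuild, pvFindPair, ih, pv_buildInner_get?]
    cases h : pvFindInner k b1 rest with
    | none => simp
    | some b2 => simp

lemma pv_index_get? (brot : List PvV) (k : PvV) :
    (pvbBuild brot PySem.Dict.empty).get? k = (pvFindPair k brot).map Prod.fst := by
  simp [pv_build_get?]

-- the counting loops agree once the match test does
lemma pv_loopA2_eq (brot : List PvV) (first : PySem.Dict PvV PvV)
    (hd : ∀ k, first.get? k = (pvFindPair k brot).map Prod.fst)
    (la1 : Nat) (a1 : PvV) (l : List PvV) (counter a1c : Int) :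
    pvbLoopA2 first brot la1 a1 l counter a1c = pvLoopA2 brot la1 a1 l counter a1c := by
  induction l generalizing counter a1c with
  | nil => rfl
  | cons a2 rest ih =>
    simp only [pvbLoopA2, pvLoopA2, hd]
    have : (a1.1 - a2.1, a1.2.1 - a2.2.1, a1.2.2 - a2.2.2) = pvDiffA a1 a2 := by
      simp [pvDiffA]
    rw [this]
    cases h : pvFindPair (pvDiffA a1 a2) brot with
    | none => simp [ih]
    | some p =>
      obtain ⟨b1, b2⟩ := p
      simp only [Option.map_some]
      split_ifs with h1 h2
      · rfl
      · simp only [pvOffsetPoints, PySem.List.foldl_append_singleton_eq_map, List.nil_append]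
      · exact ih _ _

lemma pv_loopA1_eq (brot : List PvV) (first : PySem.Dict PvV PvV)
    (hd : ∀ k, first.get? k = (pvFindPair k brot).map Prod.fst)
    (l : List PvV) (counter : Int) :
    pvbLoopA1 first brot l counter = pvLoopA1 brot l counter := by
  induction l generalizing counter with
  | nil => rfl
  | cons a1 rest ih =>
    simp only [pvbLoopA1, pvLoopA1, pv_loopA2_eq brot first hd]
    cases pvLoopA2 brot (a1 :: rest).length a1 rest counter 0 with
    | inl r => simp
    | inr c => simp [ih]

lemma pv_tryRots_eq (a b : List PvV) (rs : List PvM) :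
    pvTryRots a (rs.map (fun r => b.map (pvbApply r))) = pvbTryRots a b rs := by
  induction rs with
  | nil => rfl
  | cons r rest ih =>
    simp only [List.map_cons, pvTryRots, pvbTryRots]
    rw [pv_loopA1_eq (b.map (pvbApply r)) _ (fun k => pv_index_get? _ k)]
    cases pvLoopA1 (b.map (pvbApply r)) a 0 with
    | none => simpa using ih
    | some res => simp

-- ===== VERDICT (by name: the statement is the Claim_ definition above) =====
theorem compare_scanner_spec : Claim_equal_compare_scanner := by
  intro a b _
  show compare_scanner a b = compare_scanner_alt a b
  rw [compare_scanner, compare_scanner_alt, pv_rots_eq, pv_tryRots_eq]
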